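-- pv_equiv track=rewrite | github.com/claytonNighthawk/proj4-brevets | acp_times.py | dist_split
-- ===== SOURCE A (Python) =====
-- def dist_split(dist):
-- 	"""
-- 	returns a list break down of the km traveled to each control.
-- 	ie dist_split(666) = [200, 200, 200, 60]
-- 	which is the dist traveled from 0-200, from 200-400, from 400-600, and then
-- 	distance traveled above 600km.
--
-- 	function does not record distance traveled over 1000km however but since 1000km is
-- 	the max	brevet length, any control over 1000km has to open open/close at the same time
-- 	as a control at exactly 1000km
-- 	"""
-- 	DIST_SUBS = [200, 200, 200, 400]
-- 	dists = []
-- 	for d in DIST_SUBS: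
-- 		if dist >= d:
-- 			dists.append(d)
-- 			dist -= d
-- 		elif dist < d and dist > 0:
-- 			dists.append(dist)
-- 			dist -= d
-- 		else:
-- 			dists.append(0)
--
-- 	return dists
-- ===== SOURCE B (Python) =====
-- def dist_split(dist):
--     """Clamp formulation: each segment is (dist - offset) clamped into [0, cap]."""
--     return [min(cap, max(dist - off, 0))
--             for off, cap in [(0, 200), (200, 200), (400, 200), (600, 400)]]
-- ===== Notes on version B (the rewrite author's own statement) =====
-- stated objective: simpler
-- what changed: Replaces the stateful loop with a running remainder and a three-way elif chain by a one-line comprehension that clamps (dist - cumulative_offset) into [0, cap] for each segment.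
import Mathlib
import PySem

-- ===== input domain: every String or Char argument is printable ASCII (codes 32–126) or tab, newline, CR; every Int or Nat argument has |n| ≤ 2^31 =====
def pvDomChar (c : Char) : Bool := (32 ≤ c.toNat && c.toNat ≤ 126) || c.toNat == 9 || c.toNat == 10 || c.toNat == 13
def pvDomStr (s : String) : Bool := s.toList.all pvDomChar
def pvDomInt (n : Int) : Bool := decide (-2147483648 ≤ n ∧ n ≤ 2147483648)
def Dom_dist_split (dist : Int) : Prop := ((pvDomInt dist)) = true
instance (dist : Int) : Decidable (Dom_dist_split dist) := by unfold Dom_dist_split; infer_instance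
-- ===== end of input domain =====

-- B replaces A's stateful remainder loop (elif chain) by a direct per-segment clamp (simpler decomposition).


-- ===== PORT A =====
-- A's for-loop over DIST_SUBS, as structural recursion carrying the same state (dists, dist)
def dist_split_loop : List Int → List Int → Int → List Int
  | [], dists, _ => dists
  | d :: ds, dists, dist =>
    if dist ≥ d then dist_split_loop ds (dists ++ [d]) (dist - d)
    else if dist < d ∧ dist > 0 then dist_split_loop ds (dists ++ [dist]) (dist - d)
    else dist_split_loop ds (dists ++ [0]) dist

def dist_split (dist : Int) : List Int :=
  dist_split_loop [200, 200, 200, 400] [] dist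

-- ===== PORT B =====
def dist_split_alt (dist : Int) : List Int :=
  [((0:Int), (200:Int)), (200, 200), (400, 200), (600, 400)].map
    (fun oc => min oc.2 (max (dist - oc.1) 0))

-- ===== PRECONDITION & SPEC =====
def Spec_dist_split (dist : Int) (out : List Int) : Prop := out = dist_split_alt dist
instance (dist : Int) (out : List Int) : Decidable (Spec_dist_split dist out) := by unfold Spec_dist_split; infer_instance

-- ===== CLAIM (what is proved, stated in full; the proofs are below) =====
def Claim_equal_dist_split : Prop := ∀ (dist : Int), Dom_dist_split dist → Spec_dist_split dist (dist_split dist)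

-- ===== LEMMAS AND PROOFS =====

-- clamp of the remainder through a list of capacities (abstract form of B's per-segment values)
def clampList : List Int → Int → List Int
  | [], _ => []
  | d :: ds, r => min d (max r 0) :: clampList ds (r - d)

theorem clampList_nonpos (ds : List Int) (r r' : Int) (hds : ∀ d ∈ ds, 0 < d)
    (hr : r ≤ 0) (hr' : r' ≤ 0) : clampList ds r = clampList ds r' := by
  induction ds generalizing r r' with
  | nil => rfl
  | cons d ds ih =>
    have hd : 0 < d := hds d (by simp)
    simp only [clampList, List.cons.injEq]
    refine ⟨by omega, ?_⟩
    exact ih (r - d) (r' - d) (fun x hx => hds x (List.mem_cons_of_mem _ hx)) (by omega) (by omega)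

theorem dist_split_loop_spec (ds : List Int) (acc : List Int) (r : Int)
    (hds : ∀ d ∈ ds, 0 < d) :
    dist_split_loop ds acc r = acc ++ clampList ds r := by
  induction ds generalizing acc r with
  | nil => simp [dist_split_loop, clampList]
  | cons d ds ih =>
    have hd : 0 < d := hds d (by simp)
    have hds' : ∀ x ∈ ds, 0 < x := fun x hx => hds x (by simp [hx])
    simp only [dist_split_loop]
    split_ifs with h1 h2
    · rw [ih _ _ hds']
      simp only [clampList, List.append_assoc, List.singleton_append]
      congr 2
      omega
    · rw [ih _ _ hds']
      simp only [clampList, List.append_assoc, List.singleton_append]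
      congr 2
      omega
    · rw [ih _ _ hds']
      simp only [clampList, List.append_assoc, List.singleton_append]
      have : clampList ds r = clampList ds (r - d) :=
        clampList_nonpos ds r (r - d) hds' (by omega) (by omega)
      rw [this]
      congr 2
      omega

-- ===== VERDICT (by name: the statement is the Claim_ definition above) =====
theorem dist_split_spec : Claim_equal_dist_split := by
  intro dist _
  unfold Spec_dist_split dist_split dist_split_alt
  rw [dist_split_loop_spec _ _ _ (by decide)]
  simp only [clampList, List.map_cons, List.map_nil, List.nil_append, List.cons.injEq,
    and_true]
  norm_num
  omega
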